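-- pv_equiv track=rewrite | github.com/daniel-reich/ubiquitous-fiesta | Amjj4KNzaBEGk76P3_8.py | chemical_reactions
-- ===== SOURCE A (Python) =====
-- def chemical_reactions(carbon, hydrogen, oxygen):
--   results = [-1,-1,-1]
--   tempcarbon = carbon
--   temphydrogen = hydrogen
--   tempoxygen = oxygen
--   while results[0] == -1:
--     if hydrogen >= tempoxygen*2:
--       results[0] = tempoxygen
--       oxygen-=tempoxygen
--       hydrogen-=tempoxygen*2
--     else:
--       tempoxygen -=1
--   tempcarbon = carbon
--   temphydrogen = hydrogen
--   tempoxygen = oxygen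
--   while results[1] == -1:
--     if oxygen >= tempcarbon*2:
--       results[1] = tempcarbon
--       carbon-=tempcarbon
--       oxygen-=tempcarbon*2
--     else:
--       tempcarbon -=1
--   tempcarbon = carbon
--   temphydrogen = hydrogen
--   tempoxygen = oxygen
--   while results[2] == -1:
--     if hydrogen >= tempcarbon*4:
--       results[2] = tempcarbon
--       carbon-=tempcarbon
--       hydrogen-=tempcarbon*4
--     else:
--       tempcarbon -=1
--   return results
-- ===== SOURCE B (Python) =====
-- def chemical_reactions(carbon, hydrogen, oxygen):
--   water = min(oxygen, hydrogen // 2)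
--   hydrogen -= 2 * water
--   oxygen -= water
--   co2 = min(carbon, oxygen // 2)
--   carbon -= co2
--   methane = min(carbon, hydrogen // 4)
--   return [water, co2, methane]
-- ===== Notes on version B (the rewrite author's own statement) =====
-- stated objective: faster
-- what changed: replaces A's three unit-decrement search loops (each counting down from the current atom count until the supply condition holds; A even loops forever when a stage's answer is -1) with closed-form min/floor-division arithmetic for each reaction step
import Mathlib
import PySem

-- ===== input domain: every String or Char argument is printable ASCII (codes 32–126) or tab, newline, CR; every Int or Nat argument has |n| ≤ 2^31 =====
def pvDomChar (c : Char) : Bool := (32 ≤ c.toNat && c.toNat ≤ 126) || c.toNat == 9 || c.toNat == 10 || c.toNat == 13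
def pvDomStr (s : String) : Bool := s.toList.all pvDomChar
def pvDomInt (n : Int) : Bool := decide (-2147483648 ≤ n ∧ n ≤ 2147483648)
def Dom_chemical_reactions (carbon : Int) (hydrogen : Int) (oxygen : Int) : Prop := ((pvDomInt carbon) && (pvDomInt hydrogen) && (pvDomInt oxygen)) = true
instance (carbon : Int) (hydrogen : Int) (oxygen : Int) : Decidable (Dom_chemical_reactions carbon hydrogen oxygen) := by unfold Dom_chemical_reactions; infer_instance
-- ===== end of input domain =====

-- B replaces A's three count-down search loops with closed-form min/floor-division arithmetic (objective: faster).

-- ===== PORT A =====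
-- A's loops 'while results[i] == -1: if x >= t*2 then set results[i]=t (and mutate) else t -= 1'.
-- Except when that value is -1 (where the Python loop re-enters forever), each loop runs exactly
-- until the first t (counting down) with x ≥ t*k and returns that t; these helpers are that
-- count-down, made total with a fuel
-- argument that is exactly the number of failing iterations left (when it is 0 the test holds).
def pvCountdown2Go (x : Int) (t : Int) : Nat → Int
  | 0 => t
  | n + 1 => if x ≥ t * 2 then t else pvCountdown2Go x (t - 1) n

def pvCountdown2 (x : Int) (t : Int) : Int := pvCountdown2Go x t (t * 2 - x).toNat

def pvCountdown4Go (x : Int) (t : Int) : Nat → Int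
  | 0 => t
  | n + 1 => if x ≥ t * 4 then t else pvCountdown4Go x (t - 1) n

def pvCountdown4 (x : Int) (t : Int) : Int := pvCountdown4Go x t (t * 4 - x).toNat

def chemical_reactions (carbon : Int) (hydrogen : Int) (oxygen : Int) : List Int :=
  -- loop 1: tempoxygen counts down from oxygen until hydrogen >= tempoxygen*2
  let r0 := pvCountdown2 hydrogen oxygen
  let oxygen1 := oxygen - r0
  let hydrogen1 := hydrogen - r0 * 2
  -- loop 2: tempcarbon counts down from carbon until oxygen >= tempcarbon*2
  let r1 := pvCountdown2 oxygen1 carbon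
  let carbon1 := carbon - r1
  let _oxygen2 := oxygen1 - r1 * 2   -- A mutates oxygen here; the value is never read again
  -- loop 3: tempcarbon counts down from carbon until hydrogen >= tempcarbon*4
  let r2 := pvCountdown4 hydrogen1 carbon1
  [r0, r1, r2]

-- ===== PORT B =====
def chemical_reactions_alt (carbon : Int) (hydrogen : Int) (oxygen : Int) : List Int :=
  let water := min oxygen (PySem.Int.floordiv hydrogen 2)
  let hydrogen2 := hydrogen - 2 * water
  let oxygen2 := oxygen - water
  let co2 := min carbon (PySem.Int.floordiv oxygen2 2)
  let carbon2 := carbon - co2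
  let methane := min carbon2 (PySem.Int.floordiv hydrogen2 4)
  [water, co2, methane]

-- ===== PRECONDITION & SPEC =====
-- No Pre_: both ports are total. (The Python A loops forever when some stage's answer is -1 —
-- its 'while results[i] == -1' re-enters — e.g. chemical_reactions(18, -2, 0); the ports return
-- the stage values there and the equivalence below covers every input.)
def Spec_chemical_reactions (carbon : Int) (hydrogen : Int) (oxygen : Int) (out : List Int) : Prop := out = chemical_reactions_alt carbon hydrogen oxygen
instance (carbon : Int) (hydrogen : Int) (oxygen : Int) (out : List Int) : Decidable (Spec_chemical_reactions carbon hydrogen oxygen out) := by unfold Spec_chemical_reactions; infer_instance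

-- ===== CLAIM (what is proved, stated in full; the proofs are below) =====
def Claim_equal_chemical_reactions : Prop := ∀ (carbon : Int) (hydrogen : Int) (oxygen : Int), Dom_chemical_reactions carbon hydrogen oxygen → Spec_chemical_reactions carbon hydrogen oxygen (chemical_reactions carbon hydrogen oxygen)

-- ===== LEMMAS AND PROOFS =====
theorem pvCountdown2Go_eq (x t : Int) (n : Nat) (h : (t * 2 - x).toNat ≤ n) :
    pvCountdown2Go x t n = min t (x / 2) := by
  induction n generalizing t with
  | zero => simp only [pvCountdown2Go]; omega
  | succ n ih =>
    rw [pvCountdown2Go]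
    split
    · omega
    · rw [ih (t - 1) (by omega)]; omega

theorem pvCountdown2_eq (x t : Int) : pvCountdown2 x t = min t (PySem.Int.floordiv x 2) := by
  rw [pvCountdown2, pvCountdown2Go_eq x t _ le_rfl,
    PySem.Int.floordiv_eq_ediv_of_pos (a := x) (by omega : (0:Int) < 2)]

theorem pvCountdown4Go_eq (x t : Int) (n : Nat) (h : (t * 4 - x).toNat ≤ n) :
    pvCountdown4Go x t n = min t (x / 4) := by
  induction n generalizing t with
  | zero => simp only [pvCountdown4Go]; omega
  | succ n ih =>
    rw [pvCountdown4Go]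
    split
    · omega
    · rw [ih (t - 1) (by omega)]; omega

theorem pvCountdown4_eq (x t : Int) : pvCountdown4 x t = min t (PySem.Int.floordiv x 4) := by
  rw [pvCountdown4, pvCountdown4Go_eq x t _ le_rfl,
    PySem.Int.floordiv_eq_ediv_of_pos (a := x) (by omega : (0:Int) < 4)]

-- ===== VERDICT (by name: the statement is the Claim_ definition above) =====
theorem chemical_reactions_spec : Claim_equal_chemical_reactions := by
  intro carbon hydrogen oxygen _
  unfold Spec_chemical_reactions chemical_reactions chemical_reactions_alt
  simp only [pvCountdown2_eq, pvCountdown4_eq]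
  rw [Int.mul_comm (min oxygen (PySem.Int.floordiv hydrogen 2)) 2]
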